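-- pv_equiv track=rewrite | github.com/adrianteosj/humboldtjobs | scrapers/csu.py | _categorize_from_title
-- ===== SOURCE A (Python) =====
-- def _categorize_from_title(title: str) -> str:
--     """
--     Determine original category from job title.
--
--     Args:
--         title: Job title
--
--     Returns:
--         Category string
--     """
--     title_lower = title.lower()
--
--     if any(word in title_lower for word in ['faculty', 'professor', 'instructor', 'lecturer']):
--         return "Faculty/Academic"
--     elif any(word in title_lower for word in ['custodian', 'groundsworker', 'maintenance', 'facilities']):
--         return "Facilities/Maintenance"
--     elif any(word in title_lower for word in ['police', 'dispatcher', 'safety']):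
--         return "Public Safety"
--     elif any(word in title_lower for word in ['analyst', 'specialist', 'manager', 'coordinator']):
--         return "Administrative"
--     elif any(word in title_lower for word in ['counselor', 'advisor', 'psychotherapist']):
--         return "Student Services"
--     elif any(word in title_lower for word in ['cook', 'food', 'dining']):
--         return "Food Services"
--     elif any(word in title_lower for word in ['driver', 'bus']):
--         return "Transportation"
--     elif any(word in title_lower for word in ['student assistant', 'student worker']):
--         return "Student Employment"
--     else:
--         return "Staff"
-- ===== SOURCE B (Python) =====
-- CATEGORIES = [
--     "Faculty/Academic", "Facilities/Maintenance", "Public Safety",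
--     "Administrative", "Student Services", "Food Services",
--     "Transportation", "Student Employment",
-- ]
--
-- # Flat keyword -> priority rank (index into CATEGORIES); lower rank wins.
-- KEYWORD_RANK = {
--     'faculty': 0, 'professor': 0, 'instructor': 0, 'lecturer': 0,
--     'custodian': 1, 'groundsworker': 1, 'maintenance': 1, 'facilities': 1,
--     'police': 2, 'dispatcher': 2, 'safety': 2,
--     'analyst': 3, 'specialist': 3, 'manager': 3, 'coordinator': 3,
--     'counselor': 4, 'advisor': 4, 'psychotherapist': 4,
--     'cook': 5, 'food': 5, 'dining': 5,
--     'driver': 6, 'bus': 6,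
--     'student assistant': 7, 'student worker': 7,
-- }
--
--
-- def _categorize_from_title(title: str) -> str:
--     t = title.lower()
--     hits = [rank for kw, rank in KEYWORD_RANK.items() if kw in t]
--     return CATEGORIES[min(hits)] if hits else "Staff"
-- ===== Notes on version B (the rewrite author's own statement) =====
-- stated objective: alternative
-- what changed: Instead of an ordered early-return if/elif chain over keyword groups, B scans one flat keyword->rank dict, collects the ranks of all matched keywords, and returns the category at the minimal rank (collect-then-minimize instead of first-match chain).
import Mathlib
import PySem

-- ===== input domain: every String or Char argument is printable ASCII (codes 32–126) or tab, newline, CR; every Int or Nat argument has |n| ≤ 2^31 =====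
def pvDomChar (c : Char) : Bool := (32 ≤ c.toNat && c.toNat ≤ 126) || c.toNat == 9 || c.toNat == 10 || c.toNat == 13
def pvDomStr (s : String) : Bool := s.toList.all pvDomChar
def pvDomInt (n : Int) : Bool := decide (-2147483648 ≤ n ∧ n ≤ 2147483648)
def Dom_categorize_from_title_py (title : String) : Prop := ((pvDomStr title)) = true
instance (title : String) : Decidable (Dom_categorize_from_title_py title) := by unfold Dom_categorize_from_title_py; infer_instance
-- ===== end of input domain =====

-- B replaces the ordered if/elif chain by a flat keyword->rank scan: it collects the ranks of
-- every matched keyword and returns the category of the minimal rank (collect-then-minimize).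


-- ===== PORT A =====
def categorize_from_title_py (title : String) : String :=
  let title_lower := PySem.Str.lower title
  if ["faculty", "professor", "instructor", "lecturer"].any (fun w => PySem.Str.isIn w title_lower) then
    "Faculty/Academic"
  else if ["custodian", "groundsworker", "maintenance", "facilities"].any (fun w => PySem.Str.isIn w title_lower) then
    "Facilities/Maintenance"
  else if ["police", "dispatcher", "safety"].any (fun w => PySem.Str.isIn w title_lower) then
    "Public Safety"
  else if ["analyst", "specialist", "manager", "coordinator"].any (fun w => PySem.Str.isIn w title_lower) then
    "Administrative"
  else if ["counselor", "advisor", "psychotherapist"].any (fun w => PySem.Str.isIn w title_lower) then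
    "Student Services"
  else if ["cook", "food", "dining"].any (fun w => PySem.Str.isIn w title_lower) then
    "Food Services"
  else if ["driver", "bus"].any (fun w => PySem.Str.isIn w title_lower) then
    "Transportation"
  else if ["student assistant", "student worker"].any (fun w => PySem.Str.isIn w title_lower) then
    "Student Employment"
  else
    "Staff"

-- ===== PORT B =====
def pvCategories : List String :=
  ["Faculty/Academic", "Facilities/Maintenance", "Public Safety",
   "Administrative", "Student Services", "Food Services",
   "Transportation", "Student Employment"]

-- the KEYWORD_RANK dict (all keys distinct), in insertion order
def pvKeywordRank : List (String × Int) :=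
  [("faculty", 0), ("professor", 0), ("instructor", 0), ("lecturer", 0),
   ("custodian", 1), ("groundsworker", 1), ("maintenance", 1), ("facilities", 1),
   ("police", 2), ("dispatcher", 2), ("safety", 2),
   ("analyst", 3), ("specialist", 3), ("manager", 3), ("coordinator", 3),
   ("counselor", 4), ("advisor", 4), ("psychotherapist", 4),
   ("cook", 5), ("food", 5), ("dining", 5),
   ("driver", 6), ("bus", 6),
   ("student assistant", 7), ("student worker", 7)]

def categorize_from_title_py_alt (title : String) : String :=
  let t := PySem.Str.lower title
  -- hits = [rank for kw, rank in KEYWORD_RANK.items() if kw in t]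
  let hits := (pvKeywordRank.filter (fun p => PySem.Str.isIn p.1 t)).map (fun p => p.2)
  -- return CATEGORIES[min(hits)] if hits else "Staff"
  match PySem.List.min? hits (fun x => x) with
  | none => "Staff"
  | some r => (PySem.List.pyGet? pvCategories r).getD "Staff"

-- ===== PRECONDITION & SPEC =====
def Spec_categorize_from_title_py (title : String) (out : String) : Prop := out = categorize_from_title_py_alt title
instance (title : String) (out : String) : Decidable (Spec_categorize_from_title_py title out) := by unfold Spec_categorize_from_title_py; infer_instance

-- ===== CLAIM (what is proved, stated in full; the proofs are below) =====
def Claim_equal_categorize_from_title_py : Prop := ∀ (title : String), Dom_categorize_from_title_py title → Spec_categorize_from_title_py title (categorize_from_title_py title)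

-- ===== LEMMAS AND PROOFS =====

-- A-style first-match selection over keyword groups, starting at rank i
def pvPick (m : String → Bool) : Int → List (List String) → Option Int
  | _, [] => none
  | i, g :: gs => if g.any m then some i else pvPick m (i + 1) gs

-- the flat keyword list built from groups, ranks starting at i
def pvFlatK : Int → List (List String) → List (String × Int)
  | _, [] => []
  | i, g :: gs => g.map (fun w => (w, i)) ++ pvFlatK (i + 1) gs

def pvGroups : List (List String) :=
  [["faculty", "professor", "instructor", "lecturer"],
   ["custodian", "groundsworker", "maintenance", "facilities"],
   ["police", "dispatcher", "safety"],
   ["analyst", "specialist", "manager", "coordinator"],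
   ["counselor", "advisor", "psychotherapist"],
   ["cook", "food", "dining"],
   ["driver", "bus"],
   ["student assistant", "student worker"]]

lemma pvKeywordRank_eq_flat : pvKeywordRank = pvFlatK 0 pvGroups := by
  simp [pvKeywordRank, pvFlatK, pvGroups]

lemma pvFoldl_min_of_ge (a : Int) : ∀ (l : List Int), (∀ x ∈ l, a ≤ x) → l.foldl min a = a := by
  intro l
  induction l with
  | nil => intro _; rfl
  | cons x t ih =>
    intro h
    have hx : min a x = a := min_eq_left (h x (by simp))
    simpa [List.foldl, hx] using ih (fun y hy => h y (by simp [hy]))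

lemma pvBlock (m : String → Bool) (i : Int) :
    ∀ (g : List String),
      ((g.map (fun w => (w, i))).filter (fun p => m p.1)).map (fun p => p.2)
        = (g.filter m).map (fun _ => i) := by
  intro g
  induction g with
  | nil => rfl
  | cons w g ih =>
    simp only [List.map_cons, List.filter_cons]
    cases hw : m w <;> simp [ih]

lemma pvFlat_ranks_ge (m : String → Bool) :
    ∀ (gs : List (List String)) (i : Int)
      (x : Int), x ∈ ((pvFlatK i gs).filter (fun p => m p.1)).map (fun p => p.2) → i ≤ x := by
  intro gs
  induction gs with
  | nil => intro i x hx; simp [pvFlatK] at hx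
  | cons g gs ih =>
    intro i x hx
    simp only [pvFlatK, List.filter_append, List.map_append, List.mem_append] at hx
    rcases hx with hx | hx
    · rw [pvBlock] at hx
      simp only [List.mem_map] at hx
      obtain ⟨_, _, h⟩ := hx
      omega
    · have := ih (i + 1) x hx
      omega

lemma pvMin_flat_eq_pick (m : String → Bool) :
    ∀ (gs : List (List String)) (i : Int),
      PySem.List.min? (((pvFlatK i gs).filter (fun p => m p.1)).map (fun p => p.2)) (fun x => x)
        = pvPick m i gs := by
  intro gs
  induction gs with
  | nil => intro i; simp [pvFlatK, pvPick, PySem.List.min?]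
  | cons g gs ih =>
    intro i
    simp only [pvFlatK, pvPick, List.filter_append, List.map_append]
    rw [pvBlock]
    cases hg : g.any m with
    | false =>
      have h0 : g.filter m = [] := by
        rw [List.filter_eq_nil_iff]
        intro w hw
        rw [List.any_eq_false] at hg
        exact hg w hw
      rw [h0]
      simpa using ih (i + 1)
    | true =>
      -- first block nonempty: the minimum is i
      have hne : g.filter m ≠ [] := by
        simp only [ne_eq, List.filter_eq_nil_iff]
        intro hall
        rw [List.any_eq_true] at hg
        obtain ⟨w, hw, hmw⟩ := hg
        exact absurd hmw (by simpa using hall w hw)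
      obtain ⟨w, t, ht⟩ := List.exists_cons_of_ne_nil hne
      rw [ht]
      simp only [List.map_cons, List.cons_append]
      rw [PySem.List.min?_id_cons]
      congr 1
      apply pvFoldl_min_of_ge
      intro x hx
      rcases List.mem_append.mp hx with hx | hx
      · simp only [List.mem_map] at hx; obtain ⟨_, _, h⟩ := hx; omega
      · have := pvFlat_ranks_ge m gs (i + 1) x hx; omega

-- ===== VERDICT (by name: the statement is the Claim_ definition above) =====
theorem categorize_from_title_py_spec : Claim_equal_categorize_from_title_py := by
  intro title _
  show categorize_from_title_py title = categorize_from_title_py_alt title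
  simp only [categorize_from_title_py_alt, pvKeywordRank_eq_flat]
  rw [pvMin_flat_eq_pick (fun w => PySem.Str.isIn w (PySem.Str.lower title))]
  unfold categorize_from_title_py
  simp only [pvPick, pvGroups]
  split_ifs <;> rfl
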